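-- pv_equiv track=rewrite | github.com/xxxxxthhh/voicetyper | src/text_formatter.py | _has_min_clause_span
-- ===== SOURCE A (Python) =====
-- import unicodedata
--
-- def _content_char_count(text: str) -> int:
--     count = 0
--     for ch in text:
--         cat = unicodedata.category(ch)
--         if cat and cat[0] in {"L", "N", "M"}:
--             count += 1
--     return count
--
-- def _has_min_clause_span(
--     text: str,
--     idx: int,
--     existing_breaks: set[int],
--     selected_breaks: list[int],
-- ) -> bool:
--     # Ensure both sides have enough lexical content, to avoid over-splitting.
--     all_breaks = sorted(existing_breaks | set(selected_breaks))
--     prev_break = -1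
--     next_break = len(text)
--     for b in all_breaks:
--         if b < idx:
--             prev_break = b
--             continue
--         if b > idx:
--             next_break = b
--             break
--
--     left_span = _content_char_count(text[prev_break + 1 : idx + 1])
--     right_span = _content_char_count(text[idx + 1 : next_break + 1])
--     return left_span >= 8 and right_span >= 7
-- ===== SOURCE B (Python) =====
-- def _has_min_clause_span(
--     text: str,
--     idx: int,
--     existing_breaks: set[int],
--     selected_breaks: list[int],
-- ) -> bool:
--     # Single pass over the text itself: each character position decides locally,
--     # by a membership test over the raw break set, whether it lies in the clause
--     # ending at idx or the one following it. No sorting, no boundary search,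
--     # no slicing: a position p <= idx is in the left clause iff no break cuts
--     # the text between p and idx, and symmetrically on the right.
--     breaks = set(existing_breaks) | set(selected_breaks)
--     left = right = 0
--     for p, ch in enumerate(text):
--         if not ch.isalnum():
--             continue
--         if p <= idx:
--             if not any(p <= b < idx for b in breaks):
--                 left += 1
--         elif not any(idx < b < p for b in breaks):
--             right += 1
--     return left >= 8 and right >= 7
-- ===== Notes on version B (the rewrite author's own statement) =====
-- stated objective: alternative
-- what changed: B never locates the enclosing break pair at all: instead of A's set-union + sort + early-break scan followed by slicing and counting two substrings, B makes one pass over the text and classifies each content character locally by a break-membership test ('is there a break between this position and idx?'), accumulating the left and right counts in the same pass. …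
-- outside the precondition, e.g. on _has_min_clause_span('abcdefghXijklmnop', 7, {-17}, []): A returns False, B returns True; on _has_min_clause_span('abcdefghXijklmnop', -8, set(), []): A returns True, B returns False
import Mathlib
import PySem

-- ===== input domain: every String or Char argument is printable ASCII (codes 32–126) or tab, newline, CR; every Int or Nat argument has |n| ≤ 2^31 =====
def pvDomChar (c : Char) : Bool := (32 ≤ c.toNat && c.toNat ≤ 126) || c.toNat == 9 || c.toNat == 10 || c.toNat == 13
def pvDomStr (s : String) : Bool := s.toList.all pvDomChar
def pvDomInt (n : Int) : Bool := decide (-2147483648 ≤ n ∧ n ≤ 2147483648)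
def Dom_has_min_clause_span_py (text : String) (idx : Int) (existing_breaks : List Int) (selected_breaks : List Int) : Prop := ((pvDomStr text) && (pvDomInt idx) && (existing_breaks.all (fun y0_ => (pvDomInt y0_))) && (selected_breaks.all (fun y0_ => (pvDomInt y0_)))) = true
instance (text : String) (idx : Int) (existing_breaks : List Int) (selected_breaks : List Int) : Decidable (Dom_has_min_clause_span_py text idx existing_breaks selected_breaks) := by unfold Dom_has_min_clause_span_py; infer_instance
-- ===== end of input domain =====

-- B replaces A's set-union + sort + early-break boundary scan + two slice counts by a
-- single pass over the text in which each content character classifies itself by a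
-- break-membership test (objective: alternative).
-- The Unicode-category test `cat[0] in {"L","N","M"}` coincides with `Char.isAlphanum`
-- on the printable-ASCII input domain; both ports use that predicate (exact on Dom).

-- ===== PORT A =====
-- _content_char_count: the explicit counter loop over the characters
def pvContentCountA (s : List Char) : Int :=
  s.foldl (fun count ch => if ch.isAlphanum then count + 1 else count) 0

-- the for-loop with `continue`/`break` over the sorted breaks
def pvLoopA (idx : Int) : List Int → Int → Int → Int × Int
  | [], prev, nxt => (prev, nxt)
  | b :: rest, prev, nxt =>
    if b < idx then pvLoopA idx rest b nxt
    else if idx < b then (prev, b)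
    else pvLoopA idx rest prev nxt

def has_min_clause_span_py (text : String) (idx : Int) (existing_breaks : List Int) (selected_breaks : List Int) : Bool :=
  let all_breaks := PySem.List.sorted (PySem.Set.union existing_breaks selected_breaks) (fun x => x) false
  let s := text.toList
  let pn := pvLoopA idx all_breaks (-1) (s.length : Int)
  let left_span := pvContentCountA (PySem.List.slice s (some (pn.1 + 1)) (some (idx + 1)))
  let right_span := pvContentCountA (PySem.List.slice s (some (idx + 1)) (some (pn.2 + 1)))
  decide (8 ≤ left_span) && decide (7 ≤ right_span)

-- ===== PORT B =====
-- one pass over enumerate(text); each content character tests the raw break set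
def has_min_clause_span_py_alt (text : String) (idx : Int) (existing_breaks : List Int) (selected_breaks : List Int) : Bool :=
  let br := PySem.Set.union (PySem.Set.ofList existing_breaks) selected_breaks
  let counts := (PySem.List.enumerate text.toList 0).foldl
    (fun (acc : Int × Int) pc =>
      if !pc.2.isAlphanum then acc
      else if pc.1 ≤ idx then
        if br.any (fun b => decide (pc.1 ≤ b) && decide (b < idx)) then acc
        else (acc.1 + 1, acc.2)
      else
        if br.any (fun b => decide (idx < b) && decide (b < pc.1)) then acc
        else (acc.1, acc.2 + 1))
    ((0 : Int), (0 : Int))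
  decide (8 ≤ counts.1) && decide (7 ≤ counts.2)

-- ===== PRECONDITION & SPEC =====
-- Pre_ excludes the inputs on which Python's negative-slice-index wraparound fires in A
-- (idx, or the nearest break on either side of idx, lying in [-len(text), -2]): there A
-- counts characters taken from near the end of the text under Python's negative-index
-- reading of the bound, while B treats such out-of-range positions as cuts before the
-- start of the text — both readings defensible for break positions outside the text.
def Pre_has_min_clause_span_py (text : String) (idx : Int) (existing_breaks : List Int) (selected_breaks : List Int) : Prop :=
  ¬ (idx + 1 < 0 ∧ 0 < idx + 1 + (text.toList.length : Int)) ∧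
  (∀ b ∈ existing_breaks ++ selected_breaks, b < idx →
      (∀ b' ∈ existing_breaks ++ selected_breaks, b' < idx → b' ≤ b) →
      ¬ (b + 1 < 0 ∧ 0 < b + 1 + (text.toList.length : Int))) ∧
  (∀ b ∈ existing_breaks ++ selected_breaks, idx < b →
      (∀ b' ∈ existing_breaks ++ selected_breaks, idx < b' → b ≤ b') →
      ¬ (b + 1 < 0 ∧ 0 < b + 1 + (text.toList.length : Int)))
instance (text : String) (idx : Int) (existing_breaks : List Int) (selected_breaks : List Int) : Decidable (Pre_has_min_clause_span_py text idx existing_breaks selected_breaks) := by unfold Pre_has_min_clause_span_py; infer_instance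

def pvWitness_has_min_clause_span_py : String × Int × List Int × List Int :=
  ("abcdefgh ijklmnop", 8, [3], [12])

def Spec_has_min_clause_span_py (text : String) (idx : Int) (existing_breaks : List Int) (selected_breaks : List Int) (out : Bool) : Prop := out = has_min_clause_span_py_alt text idx existing_breaks selected_breaks
instance (text : String) (idx : Int) (existing_breaks : List Int) (selected_breaks : List Int) (out : Bool) : Decidable (Spec_has_min_clause_span_py text idx existing_breaks selected_breaks out) := by unfold Spec_has_min_clause_span_py; infer_instance

-- ===== CLAIM (what is proved, stated in full; the proofs are below) =====
def Claim_equal_has_min_clause_span_py : Prop := ∀ (text : String) (idx : Int) (existing_breaks : List Int) (selected_breaks : List Int), Dom_has_min_clause_span_py text idx existing_breaks selected_breaks → Pre_has_min_clause_span_py text idx existing_breaks selected_breaks → Spec_has_min_clause_span_py text idx existing_breaks selected_breaks (has_min_clause_span_py text idx existing_breaks selected_breaks)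

-- ===== LEMMAS AND PROOFS =====

-- Extensional characterisations of A's boundary-scan results (depend only on membership).
def pvIsPrev (idx : Int) (xs : List Int) (p : Int) : Prop :=
  (p = -1 ∧ ∀ b ∈ xs, ¬ b < idx) ∨ (p ∈ xs ∧ p < idx ∧ ∀ b ∈ xs, b < idx → b ≤ p)

def pvIsNext (idx n : Int) (xs : List Int) (q : Int) : Prop :=
  (q = n ∧ ∀ b ∈ xs, ¬ idx < b) ∨ (q ∈ xs ∧ idx < q ∧ ∀ b ∈ xs, idx < b → q ≤ b)

theorem pvIsPrev_congr {idx : Int} {xs ys : List Int} (hmem : ∀ b, b ∈ xs ↔ b ∈ ys)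
    {p : Int} (h : pvIsPrev idx xs p) : pvIsPrev idx ys p := by
  rcases h with ⟨hp, hall⟩ | ⟨hm, hlt, hmax⟩
  · exact Or.inl ⟨hp, fun b hb => hall b ((hmem b).2 hb)⟩
  · exact Or.inr ⟨(hmem p).1 hm, hlt, fun b hb => hmax b ((hmem b).2 hb)⟩

theorem pvIsNext_congr {idx n : Int} {xs ys : List Int} (hmem : ∀ b, b ∈ xs ↔ b ∈ ys)
    {q : Int} (h : pvIsNext idx n xs q) : pvIsNext idx n ys q := by
  rcases h with ⟨hq, hall⟩ | ⟨hm, hlt, hmin⟩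
  · exact Or.inl ⟨hq, fun b hb => hall b ((hmem b).2 hb)⟩
  · exact Or.inr ⟨(hmem q).1 hm, hlt, fun b hb => hmin b ((hmem b).2 hb)⟩

-- A's early-break loop on a ≤-sorted list, in closed form.
theorem pvLoopA_eq (idx : Int) :
    ∀ (ys : List Int), List.Pairwise (· ≤ ·) ys → ∀ (prev nxt : Int),
      pvLoopA idx ys prev nxt =
        ((ys.filter (fun b => decide (b < idx))).getLastD prev,
         (ys.filter (fun b => decide (idx < b))).headD nxt) := by
  intro ys
  induction ys with
  | nil => intro _ prev nxt; simp [pvLoopA]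
  | cons b rest ih =>
    intro hpw prev nxt
    have hrest := hpw.of_cons
    have hble := (List.pairwise_cons.1 hpw).1
    by_cases h1 : b < idx
    · have h2 : ¬ idx < b := by omega
      have hp : (b :: rest).filter (fun b => decide (b < idx)) =
          b :: rest.filter (fun b => decide (b < idx)) := by simp [h1]
      have hq : (b :: rest).filter (fun b => decide (idx < b)) =
          rest.filter (fun b => decide (idx < b)) := by simp [h2]
      simp only [pvLoopA, if_pos h1]
      rw [ih hrest b nxt, hp, hq, List.getLastD_cons]
    · by_cases h2 : idx < b
      · simp only [pvLoopA, if_neg h1, if_pos h2]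
        have hfe : rest.filter (fun b => decide (b < idx)) = [] := by
          rw [List.filter_eq_nil_iff]
          intro y hy
          have := hble y hy
          simp only [decide_eq_true_eq]; omega
        have hp : (b :: rest).filter (fun b => decide (b < idx)) = [] := by
          simp [h1, hfe]
        have hq : (b :: rest).filter (fun b => decide (idx < b)) =
            b :: rest.filter (fun b => decide (idx < b)) := by simp [h2]
        rw [hp, hq]
        rfl
      · have hp : (b :: rest).filter (fun b => decide (b < idx)) =
            rest.filter (fun b => decide (b < idx)) := by simp [h1]
        have hq : (b :: rest).filter (fun b => decide (idx < b)) =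
            rest.filter (fun b => decide (idx < b)) := by simp [h2]
        simp only [pvLoopA, if_neg h1, if_neg h2]
        rw [ih hrest prev nxt, hp, hq]

-- getLastD / headD of a ≤-sorted filter satisfy the boundary specs.
theorem pv_le_getLastD (l : List Int) (hpw : List.Pairwise (· ≤ ·) l) :
    ∀ (d : Int), ∀ x ∈ l, x ≤ l.getLastD d := by
  induction l with
  | nil => simp
  | cons a t ih =>
    intro d x hx
    rw [List.getLastD_cons]
    rcases List.mem_cons.1 hx with rfl | hxt
    · rcases List.mem_cons.1 (List.getLastD_mem_cons (l := t) (a := x)) with h | h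
      · rw [h]
      · exact (List.pairwise_cons.1 hpw).1 _ h
    · exact ih hpw.of_cons a x hxt

theorem pvGetLastD_isPrev (idx : Int) (ys : List Int) (hpw : List.Pairwise (· ≤ ·) ys) :
    pvIsPrev idx ys ((ys.filter (fun b => decide (b < idx))).getLastD (-1)) := by
  rcases hf : ys.filter (fun b => decide (b < idx)) with _ | ⟨x, t⟩
  · refine Or.inl ⟨rfl, fun b hb hlt => ?_⟩
    have : b ∈ ys.filter (fun b => decide (b < idx)) := List.mem_filter.2 ⟨hb, by simpa using hlt⟩
    simp [hf] at this
  · right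
    have hmem : (x :: t).getLastD (-1) ∈ x :: t := by
      rw [List.getLastD_cons]; exact List.getLastD_mem_cons
    have hmemf : (x :: t).getLastD (-1) ∈ ys.filter (fun b => decide (b < idx)) := hf ▸ hmem
    have hmemys := (List.mem_filter.1 hmemf).1
    have hlt : (x :: t).getLastD (-1) < idx := by
      have := (List.mem_filter.1 hmemf).2; simpa using this
    refine ⟨hmemys, hlt, fun b hb hblt => ?_⟩
    have hbf : b ∈ ys.filter (fun b => decide (b < idx)) :=
      List.mem_filter.2 ⟨hb, by simpa using hblt⟩
    have hpwf : List.Pairwise (· ≤ ·) (ys.filter (fun b => decide (b < idx))) := hpw.filter _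
    have := pv_le_getLastD _ hpwf (-1) b hbf
    exact hf ▸ this

theorem pvHeadD_isNext (idx n : Int) (ys : List Int) (hpw : List.Pairwise (· ≤ ·) ys) :
    pvIsNext idx n ys ((ys.filter (fun b => decide (idx < b))).headD n) := by
  rcases hf : ys.filter (fun b => decide (idx < b)) with _ | ⟨x, t⟩
  · refine Or.inl ⟨rfl, fun b hb hlt => ?_⟩
    have : b ∈ ys.filter (fun b => decide (idx < b)) := List.mem_filter.2 ⟨hb, by simpa using hlt⟩
    simp [hf] at this
  · right
    have hmemf : x ∈ ys.filter (fun b => decide (idx < b)) := hf ▸ List.mem_cons_self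
    have hmemys := (List.mem_filter.1 hmemf).1
    have hlt : idx < x := by
      have := (List.mem_filter.1 hmemf).2; simpa using this
    refine ⟨by simpa using hmemys, by simpa using hlt, fun b hb hblt => ?_⟩
    have hbf : b ∈ ys.filter (fun b => decide (idx < b)) :=
      List.mem_filter.2 ⟨hb, by simpa using hblt⟩
    have hpwf : List.Pairwise (· ≤ ·) (ys.filter (fun b => decide (idx < b))) := hpw.filter _
    rw [hf] at hbf
    rcases List.mem_cons.1 hbf with rfl | hbt
    · simp
    · have := (List.pairwise_cons.1 (hf ▸ hpwf)).1 b hbt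
      simpa using this

-- membership in A's sorted union = membership in the concatenation
theorem pv_mem_sorted_union (existing_breaks selected_breaks : List Int) (b : Int) :
    b ∈ PySem.List.sorted (PySem.Set.union existing_breaks selected_breaks) (fun x => x) false ↔
      b ∈ existing_breaks ++ selected_breaks := by
  rw [(PySem.List.sorted_perm _ _ _).mem_iff, PySem.Set.union, PySem.Set.mem_update,
    List.mem_append]

-- membership in B's set union = membership in the concatenation
theorem pv_mem_union_ofList (existing_breaks selected_breaks : List Int) (b : Int) :
    b ∈ PySem.Set.union (PySem.Set.ofList existing_breaks) selected_breaks ↔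
      b ∈ existing_breaks ++ selected_breaks := by
  rw [PySem.Set.union, PySem.Set.mem_update, PySem.Set.mem_ofList, List.mem_append]

-- A's counter loop is countP
theorem pvContentCountA_eq (s : List Char) :
    pvContentCountA s = (s.countP Char.isAlphanum : Int) := by
  simpa using PySem.List.foldl_if_add_one Char.isAlphanum s 0

-- B's two-accumulator fold is a pair of countP's
theorem pvFoldPair (f : Int × Int → Int × Char → Int × Int) (CL CR : Int × Char → Bool)
    (hf : ∀ acc pc, f acc pc =
      (acc.1 + (if CL pc then 1 else 0), acc.2 + (if CR pc then 1 else 0))) :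
    ∀ (l : List (Int × Char)) (acc : Int × Int),
      l.foldl f acc = (acc.1 + (l.countP CL : Int), acc.2 + (l.countP CR : Int)) := by
  intro l
  induction l with
  | nil => intro acc; simp
  | cons x t ih =>
    intro acc
    rw [List.foldl_cons, ih, hf]
    rcases acc with ⟨a1, a2⟩
    simp only [List.countP_cons]
    by_cases h1 : CL x <;> by_cases h2 : CR x <;>
      simp only [h1, h2, if_true, Prod.mk.injEq] <;> constructor <;> push_cast <;> ring

-- counting an index-window condition over enumerate = counting the clamped drop/take window
theorem pvWinCount (s : List Char) (q : Char → Bool) (C : Int × Char → Bool) (la lb : Nat)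
    (hla : la ≤ s.length) (hlb : lb ≤ s.length)
    (hC : ∀ (k : Nat) (c : Char), k < s.length →
      C ((k : Int), c) = (decide (la ≤ k ∧ k < lb) && q c)) :
    ((PySem.List.enumerate s 0).countP C : Int) = (((s.drop la).take (lb - la)).countP q : Int) := by
  have hs : s = s.take la ++ ((s.drop la).take (lb - la) ++ (s.drop la).drop (lb - la)) := by
    simp
  have hlenA : (s.take la).length = la := by
    simp [Nat.min_eq_left hla]
  have hlenM : ((s.drop la).take (lb - la)).length = min (lb - la) (s.length - la) := by
    simp
  have hmain :
      (PySem.List.enumerate s 0).countP C =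
        (PySem.List.enumerate (s.take la) 0).countP C +
        ((PySem.List.enumerate ((s.drop la).take (lb - la)) ((0 : Int) + (s.take la).length)).countP C +
         (PySem.List.enumerate ((s.drop la).drop (lb - la))
            (((0 : Int) + (s.take la).length) + ((s.drop la).take (lb - la)).length)).countP C) := by
    conv_lhs => rw [hs]
    rw [PySem.List.enumerate_append, PySem.List.enumerate_append, List.countP_append,
      List.countP_append]
  have h1 : (PySem.List.enumerate (s.take la) 0).countP C = 0 := by
    rw [List.countP_eq_zero]
    intro pc hpc
    rcases (PySem.List.mem_enumerate_iff _ _ _).1 hpc with ⟨k, hk, rfl⟩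
    have hk' : k < la := by omega
    have := hC k ((s.take la)[k]) (by omega)
    simp only [zero_add]
    rw [this]
    have hw : ¬ (la ≤ k ∧ k < lb) := by omega
    simp [hw]
  have h3 : (PySem.List.enumerate ((s.drop la).drop (lb - la))
      (((0 : Int) + (s.take la).length) + ((s.drop la).take (lb - la)).length)).countP C = 0 := by
    rw [List.countP_eq_zero]
    intro pc hpc
    rcases (PySem.List.mem_enumerate_iff _ _ _).1 hpc with ⟨k, hk, rfl⟩
    simp only [List.length_drop] at hk
    have hkn : la + min (lb - la) (s.length - la) + k < s.length := by omega
    have := hC (la + min (lb - la) (s.length - la) + k) (((s.drop la).drop (lb - la))[k]) hkn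
    have harg : ((0 : Int) + (s.take la).length) + ((s.drop la).take (lb - la)).length + (k : Int) =
        ((la + min (lb - la) (s.length - la) + k : Nat) : Int) := by
      rw [hlenA, hlenM]; push_cast; ring
    rw [harg, this]
    have hw : ¬ (la ≤ la + min (lb - la) (s.length - la) + k ∧
        la + min (lb - la) (s.length - la) + k < lb) := by omega
    simp [hw]
  have h2 : (PySem.List.enumerate ((s.drop la).take (lb - la)) ((0 : Int) + (s.take la).length)).countP C =
      ((s.drop la).take (lb - la)).countP q := by
    have hcongr : (PySem.List.enumerate ((s.drop la).take (lb - la)) ((0 : Int) + (s.take la).length)).countP C =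
        (PySem.List.enumerate ((s.drop la).take (lb - la)) ((0 : Int) + (s.take la).length)).countP
          (fun pc => q pc.2) := by
      apply List.countP_congr
      intro pc hpc
      rcases (PySem.List.mem_enumerate_iff _ _ _).1 hpc with ⟨k, hk, rfl⟩
      rw [hlenM] at hk
      have hkn : la + k < s.length := by omega
      have := hC (la + k) (((s.drop la).take (lb - la))[k]) hkn
      have harg : ((0 : Int) + (s.take la).length) + (k : Int) = ((la + k : Nat) : Int) := by
        rw [hlenA]; push_cast; ring
      rw [harg, this]
      have hwin : la ≤ la + k ∧ la + k < lb := by omega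
      simp [hwin]
    rw [hcongr]
    have := PySem.List.map_snd_enumerate ((s.drop la).take (lb - la)) ((0 : Int) + (s.take la).length)
    calc (PySem.List.enumerate ((s.drop la).take (lb - la)) ((0 : Int) + (s.take la).length)).countP
          (fun pc => q pc.2)
        = ((PySem.List.enumerate ((s.drop la).take (lb - la)) ((0 : Int) + (s.take la).length)).map
            (fun pc => pc.2)).countP q := by rw [List.countP_map]; rfl
      _ = ((s.drop la).take (lb - la)).countP q := by rw [this]
  rw [hmain, h1, h2, h3]
  simp

-- the left per-character test names exactly A's left window
theorem pvLeftWindow (idx prev : Int) (U : List Int) (n : Nat)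
    (hprev : pvIsPrev idx U prev)
    (hnwP : 0 ≤ prev + 1 ∨ prev + 1 + (n : Int) ≤ 0)
    (hnwI : 0 ≤ idx + 1 ∨ idx + 1 + (n : Int) ≤ 0)
    (k : Nat) (hk : k < n) :
    ((decide ((k : Int) ≤ idx)) && !(U.any (fun b => decide ((k : Int) ≤ b) && decide (b < idx)))) =
      decide (PySem.List.clampIdx n (prev + 1) ≤ k ∧ k < PySem.List.clampIdx n (idx + 1)) := by
  rw [Bool.eq_iff_iff]
  simp only [Bool.and_eq_true, Bool.not_eq_true', decide_eq_true_eq, List.any_eq_false,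
    PySem.List.clampIdx]
  constructor
  · rintro ⟨hki, hno⟩
    constructor
    · rcases hprev with ⟨rfl, hall⟩ | ⟨hm, hlt, hmax⟩
      · split_ifs <;> omega
      · have h := hno prev hm
        rcases hnwP with hw | hw <;> split_ifs <;> omega
    · split_ifs <;> omega
  · rintro ⟨hla, hlb⟩
    have hki : (k : Int) ≤ idx := by
      rcases hnwI with h | h
      · split_ifs at hlb <;> omega
      · split_ifs at hlb <;> omega
    refine ⟨hki, fun b hb => ?_⟩
    by_cases hblt : b < idx
    · rcases hprev with ⟨rfl, hall⟩ | ⟨hm, hlt, hmax⟩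
      · have := hall b hb
        omega
      · have hbp := hmax b hb hblt
        rcases hnwP with h | h
        · split_ifs at hla <;> omega
        · omega
    · omega

-- the right per-character test names exactly A's right window
theorem pvRightWindow (idx nxt : Int) (U : List Int) (n : Nat)
    (hnext : pvIsNext idx (n : Int) U nxt)
    (hnwN : 0 ≤ nxt + 1 ∨ nxt + 1 + (n : Int) ≤ 0)
    (hnwI : 0 ≤ idx + 1 ∨ idx + 1 + (n : Int) ≤ 0)
    (k : Nat) (hk : k < n) :
    ((!decide ((k : Int) ≤ idx)) && !(U.any (fun b => decide (idx < b) && decide (b < (k : Int))))) =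
      decide (PySem.List.clampIdx n (idx + 1) ≤ k ∧ k < PySem.List.clampIdx n (nxt + 1)) := by
  rw [Bool.eq_iff_iff]
  simp only [Bool.and_eq_true, Bool.not_eq_true', decide_eq_true_eq, List.any_eq_false,
    decide_eq_false_iff_not, PySem.List.clampIdx]
  constructor
  · rintro ⟨hki, hno⟩
    constructor
    · rcases hnwI with h | h <;> split_ifs <;> omega
    · rcases hnext with ⟨rfl, hall⟩ | ⟨hm, hlt, hmin⟩
      · split_ifs <;> omega
      · have h := hno nxt hm
        rcases hnwN with hw | hw <;> split_ifs <;> omega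
  · rintro ⟨hla, hlb⟩
    have hki : ¬ (k : Int) ≤ idx := by
      rcases hnwI with h | h
      · split_ifs at hla <;> omega
      · omega
    refine ⟨hki, fun b hb => ?_⟩
    by_cases hblt : idx < b
    · rcases hnext with ⟨rfl, hall⟩ | ⟨hm, hlt, hmin⟩
      · have := hall b hb
        omega
      · have hbn := hmin b hb hblt
        rcases hnwN with h | h
        · split_ifs at hlb <;> omega
        · split_ifs at hlb <;> omega
    · omega

-- ===== VERDICT (by name: the statement is the Claim_ definition above) =====
theorem has_min_clause_span_py_spec : Claim_equal_has_min_clause_span_py := by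
  intro text idx existing_breaks selected_breaks _ hpre
  unfold Spec_has_min_clause_span_py
  simp only [has_min_clause_span_py, has_min_clause_span_py_alt]
  set s := text.toList with hsdef
  set n := s.length with hndef
  set U := existing_breaks ++ selected_breaks with hU
  set ys := PySem.List.sorted (PySem.Set.union existing_breaks selected_breaks) (fun x => x) false with hys
  have hpw : List.Pairwise (· ≤ ·) ys := by
    simpa using PySem.List.sorted_pairwise (PySem.Set.union existing_breaks selected_breaks) (fun x => x)
  have hmem : ∀ b, b ∈ ys ↔ b ∈ U := pv_mem_sorted_union existing_breaks selected_breaks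
  rw [pvLoopA_eq idx ys hpw]
  set prev := (ys.filter (fun b => decide (b < idx))).getLastD (-1) with hprevdef
  set nxt := (ys.filter (fun b => decide (idx < b))).headD (n : Int) with hnxtdef
  have hprev : pvIsPrev idx U prev := pvIsPrev_congr hmem (pvGetLastD_isPrev idx ys hpw)
  have hnext : pvIsNext idx (n : Int) U nxt := pvIsNext_congr hmem (pvHeadD_isNext idx (n : Int) ys hpw)
  obtain ⟨hpreI, hpreP, hpreN⟩ := hpre
  have hnwI : 0 ≤ idx + 1 ∨ idx + 1 + (n : Int) ≤ 0 := by
    rw [hndef, hsdef]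
    omega
  have hnwP : 0 ≤ prev + 1 ∨ prev + 1 + (n : Int) ≤ 0 := by
    rcases hprev with ⟨h1, _⟩ | ⟨hm, hlt, hmax⟩
    · omega
    · have h := hpreP prev hm hlt (fun b' hb' hl' => hmax b' hb' hl')
      rw [hndef, hsdef]
      omega
  have hnwN : 0 ≤ nxt + 1 ∨ nxt + 1 + (n : Int) ≤ 0 := by
    rcases hnext with ⟨h1, _⟩ | ⟨hm, hlt, hmin⟩
    · omega
    · have h := hpreN nxt hm hlt (fun b' hb' hl' => hmin b' hb' hl')
      rw [hndef, hsdef]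
      omega
  -- B's fold is a pair of window counts
  set br := PySem.Set.union (PySem.Set.ofList existing_breaks) selected_breaks with hbr
  set CL : Int × Char → Bool := fun pc =>
    pc.2.isAlphanum && (decide (pc.1 ≤ idx) &&
      !(br.any (fun b => decide (pc.1 ≤ b) && decide (b < idx)))) with hCL
  set CR : Int × Char → Bool := fun pc =>
    pc.2.isAlphanum && ((!decide (pc.1 ≤ idx)) &&
      !(br.any (fun b => decide (idx < b) && decide (b < pc.1)))) with hCR
  have hstep : ∀ (acc : Int × Int) (pc : Int × Char),
      (if !pc.2.isAlphanum then acc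
       else if pc.1 ≤ idx then
        if br.any (fun b => decide (pc.1 ≤ b) && decide (b < idx)) then acc
        else (acc.1 + 1, acc.2)
       else
        if br.any (fun b => decide (idx < b) && decide (b < pc.1)) then acc
        else (acc.1, acc.2 + 1)) =
      (acc.1 + (if CL pc then 1 else 0), acc.2 + (if CR pc then 1 else 0)) := by
    intro acc pc
    rcases pc with ⟨p, c⟩
    simp only [hCL, hCR]
    by_cases ha : c.isAlphanum <;>
      by_cases hp : p ≤ idx <;>
        by_cases hl : br.any (fun b => decide (p ≤ b) && decide (b < idx)) <;>
          by_cases hr : br.any (fun b => decide (idx < b) && decide (b < p)) <;>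
            simp [ha, hp, hl, hr]
  rw [pvFoldPair _ CL CR hstep]
  simp only [zero_add]
  -- convert the two window counts to A's slice counts
  have hbrU : ∀ b, b ∈ br ↔ b ∈ U := pv_mem_union_ofList existing_breaks selected_breaks
  have hanyL : ∀ (p : Int), (br.any (fun b => decide (p ≤ b) && decide (b < idx))) =
      (U.any (fun b => decide (p ≤ b) && decide (b < idx))) := by
    intro p
    rw [Bool.eq_iff_iff, List.any_eq_true, List.any_eq_true]
    constructor
    · rintro ⟨b, hb, h⟩; exact ⟨b, (hbrU b).1 hb, h⟩
    · rintro ⟨b, hb, h⟩; exact ⟨b, (hbrU b).2 hb, h⟩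
  have hanyR : ∀ (p : Int), (br.any (fun b => decide (idx < b) && decide (b < p))) =
      (U.any (fun b => decide (idx < b) && decide (b < p))) := by
    intro p
    rw [Bool.eq_iff_iff, List.any_eq_true, List.any_eq_true]
    constructor
    · rintro ⟨b, hb, h⟩; exact ⟨b, (hbrU b).1 hb, h⟩
    · rintro ⟨b, hb, h⟩; exact ⟨b, (hbrU b).2 hb, h⟩
  have hleft : ((PySem.List.enumerate s 0).countP CL : Int) =
      pvContentCountA (PySem.List.slice s (some (prev + 1)) (some (idx + 1))) := by
    rw [pvContentCountA_eq]
    simp only [PySem.List.slice]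
    apply pvWinCount s Char.isAlphanum CL _ _ (PySem.List.clampIdx_le _ _) (PySem.List.clampIdx_le _ _)
    intro k c hkn
    simp only [hCL]
    rw [hanyL, pvLeftWindow idx prev U n hprev hnwP hnwI k hkn, Bool.and_comm]
  have hright : ((PySem.List.enumerate s 0).countP CR : Int) =
      pvContentCountA (PySem.List.slice s (some (idx + 1)) (some (nxt + 1))) := by
    rw [pvContentCountA_eq]
    simp only [PySem.List.slice]
    apply pvWinCount s Char.isAlphanum CR _ _ (PySem.List.clampIdx_le _ _) (PySem.List.clampIdx_le _ _)
    intro k c hkn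
    simp only [hCR]
    rw [hanyR, pvRightWindow idx nxt U n hnext hnwN hnwI k hkn, Bool.and_comm]
  rw [hleft, hright]
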